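-- pv_equiv track=rewrite | github.com/Powerkrieger/advent_of_code | 2023/day14.py | count_weight_on_pole
-- ===== SOURCE A (Python) =====
-- def count_weight_on_pole(platform):
--     answer = 0
--     for line in platform:
--         weight = []
--         start = 0
--         max_space = len(line)
--         for i, space in enumerate(line, start=1):
--             if space == "O":
--                 weight.append(max_space - start)
--                 start += 1
--             elif space == "#":
--                 start = i
--         answer += sum(weight)
--     return answer
-- ===== SOURCE B (Python) =====
-- def _load(c, length, pos):
--     # load of c rocks stacked from slot pos (0-indexed) in a line of length `length`
--     return c * (length - pos) - c * (c - 1) // 2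
--
-- def count_weight_on_pole(platform):
--     answer = 0
--     for line in platform:
--         length = len(line)
--         pos = 0
--         for seg in line.split('#'):
--             c = seg.count('O')
--             answer += _load(c, length, pos)
--             pos += len(seg) + 1
--     return answer
-- ===== Notes on version B (the rewrite author's own statement) =====
-- stated objective: alternative
-- what changed: B splits each line on '#' into barrier-delimited segments, counts the 'O's per segment, and adds each segment's load with the closed-form arithmetic-series formula c*(length-pos)-c*(c-1)//2, instead of A's per-character enumerate loop that appends one weight per rock into a list with a sliding start accumulator and sums it.
import Mathlib
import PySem

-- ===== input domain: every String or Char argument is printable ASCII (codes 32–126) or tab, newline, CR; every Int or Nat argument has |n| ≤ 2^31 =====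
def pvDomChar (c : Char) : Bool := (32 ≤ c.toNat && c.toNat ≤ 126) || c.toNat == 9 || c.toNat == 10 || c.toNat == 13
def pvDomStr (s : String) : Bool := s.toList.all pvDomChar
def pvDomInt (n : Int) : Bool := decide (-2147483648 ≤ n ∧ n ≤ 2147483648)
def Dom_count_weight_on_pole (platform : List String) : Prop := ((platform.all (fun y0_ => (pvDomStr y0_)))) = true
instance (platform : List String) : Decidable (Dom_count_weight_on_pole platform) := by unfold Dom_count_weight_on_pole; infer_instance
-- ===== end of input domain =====

-- B replaces A's per-character enumerate loop (one appended weight per rock, sliding 'start')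
-- by splitting each line on '#', counting the 'O's per segment, and adding the closed-form
-- arithmetic-series load c*(L-pos) - c*(c-1)//2 per segment (objective: alternative; same cost).


-- ===== PORT A =====
-- inner-loop body of A: on 'O' append (max_space - start) and bump start, on '#' set start to the
-- 1-based index, else unchanged
def cwA_step (maxSpace : Int) (s : List Int × Int) (p : Int × Char) : List Int × Int :=
  if p.2 == 'O' then (s.1 ++ [maxSpace - s.2], s.2 + 1)
  else if p.2 == '#' then (s.1, p.1)
  else s

def count_weight_on_pole (platform : List String) : Int :=
  platform.foldl (fun answer line =>
    let maxSpace : Int := PySem.Str.len line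
    let st := (PySem.List.enumerate line.toList 1).foldl (cwA_step maxSpace) ([], 0)
    answer + st.1.sum) 0

-- ===== PORT B =====
-- Source B's _load helper: load of c rocks stacked from slot pos in a line of length `length`
def cwLoad (c length pos : Int) : Int := c * (length - pos) - PySem.Int.floordiv (c * (c - 1)) 2

-- Source B's inner loop body over one '#'-delimited segment, state (answer, pos)
def cwB_seg (length : Int) (s : Int × Int) (seg : List Char) : Int × Int :=
  (s.1 + cwLoad (PySem.Chars.count seg ['O'] : Int) length s.2, s.2 + (seg.length : Int) + 1)

def count_weight_on_pole_alt (platform : List String) : Int :=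
  platform.foldl (fun answer line =>
    let length : Int := PySem.Str.len line
    ((PySem.Chars.splitOn line.toList ['#']).foldl (cwB_seg length) (answer, 0)).1) 0

-- ===== PRECONDITION & SPEC =====
def Spec_count_weight_on_pole (platform : List String) (out : Int) : Prop := out = count_weight_on_pole_alt platform
instance (platform : List String) (out : Int) : Decidable (Spec_count_weight_on_pole platform out) := by unfold Spec_count_weight_on_pole; infer_instance

-- ===== CLAIM (what is proved, stated in full; the proofs are below) =====
def Claim_equal_count_weight_on_pole : Prop := ∀ (platform : List String), Dom_count_weight_on_pole platform → Spec_count_weight_on_pole platform (count_weight_on_pole platform)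

-- ===== LEMMAS AND PROOFS =====

-- simple recursive model of splitting on '#': first segment continues cur
def cwSplit (cur : List Char) : List Char → List (List Char)
  | [] => [cur]
  | c :: rest => if c = '#' then cur :: cwSplit [] rest else cwSplit (cur ++ [c]) rest

lemma splitOn_go_eq : ∀ (l : List Char) (fuel : Nat) (cur : List Char) (acc : List (List Char)),
    l.length < fuel →
    PySem.Chars.splitOn.go ['#'] fuel l cur acc = acc.reverse ++ cwSplit cur.reverse l := by
  intro l
  induction l with
  | nil =>
    intro fuel cur acc h
    obtain ⟨f, rfl⟩ := Nat.exists_eq_succ_of_ne_zero (by omega : fuel ≠ 0)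
    simp [PySem.Chars.splitOn.go, cwSplit]
  | cons c rest ih =>
    intro fuel cur acc h
    obtain ⟨f, rfl⟩ := Nat.exists_eq_succ_of_ne_zero (by omega : fuel ≠ 0)
    by_cases hc : c = '#'
    · subst hc
      rw [PySem.Chars.splitOn.go, if_pos (by simp)]
      simp only [List.length_cons, List.length_nil, List.drop_succ_cons, List.drop_zero]
      rw [ih f [] (cur.reverse :: acc) (by simp at h ⊢; omega)]
      simp [cwSplit]
    · rw [PySem.Chars.splitOn.go, if_neg (by simp; exact fun hh => (hc hh.symm).elim)]
      rw [ih f (c :: cur) acc (by simp at h ⊢; omega)]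
      simp [cwSplit, hc]

lemma splitOn_eq (l : List Char) : PySem.Chars.splitOn l ['#'] = cwSplit [] l := by
  unfold PySem.Chars.splitOn
  rw [splitOn_go_eq l (l.length + 1) [] [] (by omega)]
  simp

-- single-character needle: PySem's substring count is the plain character count
lemma count_go_single (c : Char) : ∀ (l : List Char) (fuel : Nat) (acc : Nat),
    l.length ≤ fuel → PySem.Chars.count.go [c] fuel l acc = acc + l.count c := by
  intro l
  induction l with
  | nil =>
    intro fuel acc h
    cases fuel <;> simp [PySem.Chars.count.go]
  | cons d rest ih =>
    intro fuel acc h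
    obtain ⟨f, rfl⟩ := Nat.exists_eq_succ_of_ne_zero (by simp at h; omega : fuel ≠ 0)
    by_cases hd : c = d
    · subst hd
      rw [PySem.Chars.count.go, if_pos (by simp)]
      simp only [List.length_cons, List.length_nil, List.drop_succ_cons, List.drop_zero]
      rw [ih f (acc + 1) (by simp at h ⊢; omega)]
      simp
      omega
    · rw [PySem.Chars.count.go, if_neg (by simp; exact fun hh => (hd hh).elim)]
      rw [ih f acc (by simp at h ⊢; omega)]
      simp [List.count_cons]
      exact fun hh => (hd hh.symm).elim

lemma count_single (c : Char) (l : List Char) : PySem.Chars.count l [c] = l.count c := by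
  unfold PySem.Chars.count
  simp only [List.isEmpty_cons, Bool.false_eq_true, if_false]
  rw [count_go_single c l l.length 0 (le_refl _)]; omega

-- the closed-form load grows by the next weight when one more rock joins the segment
lemma cwLoad_succ (L pos : Int) (k : Nat) :
    cwLoad ((k : Int) + 1) L pos = cwLoad (k : Int) L pos + (L - pos - (k : Int)) := by
  obtain ⟨m, hm⟩ := Int.even_mul_succ_self ((k : Int) - 1)
  unfold cwLoad
  rw [PySem.Int.floordiv_eq_ediv_of_pos (by norm_num), PySem.Int.floordiv_eq_ediv_of_pos (by norm_num)]
  have h1 : (k : Int) * ((k : Int) - 1) = 2 * m := by linear_combination hm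
  have h2 : ((k : Int) + 1) * ((k : Int) + 1 - 1) = 2 * (m + (k : Int)) := by linear_combination hm
  rw [h1, h2, Int.mul_ediv_cancel_left _ (by norm_num), Int.mul_ediv_cancel_left _ (by norm_num)]
  ring

lemma cwLoad_zero (L pos : Int) : cwLoad 0 L pos = 0 := by
  unfold cwLoad
  rw [PySem.Int.floordiv_eq_ediv_of_pos (by norm_num)]
  norm_num

-- loop invariant tying A's per-character fold to B's per-segment fold: pre is the consumed part
-- of the current segment, segstart its starting index, and the books balance via cwLoad
lemma cw_core (L : Int) (cs : List Char) :
    ∀ (pre : List Char) (i : Int) (w : List Int) (base total segstart : Int),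
      i = segstart + (pre.length : Int) →
      base + w.sum = total + cwLoad ((pre.count 'O' : Int)) L segstart →
      base + (((PySem.List.enumerate cs (i + 1)).foldl (cwA_step L)
          (w, segstart + (pre.count 'O' : Int))).1).sum
        = ((cwSplit pre cs).foldl (cwB_seg L) (total, segstart)).1 := by
  induction cs with
  | nil =>
    intro pre i w base total segstart hi hw
    simp [PySem.List.enumerate, cwSplit, cwB_seg, count_single]
    linarith [hw]
  | cons c rest ih =>
    intro pre i w base total segstart hi hw
    rw [PySem.List.enumerate_cons]
    simp only [List.foldl_cons]
    by_cases hO : c = 'O'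
    · subst hO
      have hstep : cwA_step L (w, segstart + (pre.count 'O' : Int)) (i + 1, 'O')
          = (w ++ [L - (segstart + (pre.count 'O' : Int))], segstart + (pre.count 'O' : Int) + 1) := by
        simp [cwA_step]
      rw [hstep]
      have hB : cwSplit pre ('O' :: rest) = cwSplit (pre ++ ['O']) rest := by
        simp [cwSplit]
      rw [hB]
      have h2 := ih (pre ++ ['O']) (i + 1)
        (w ++ [L - (segstart + (pre.count 'O' : Int))]) base total segstart
        (by simp [hi]; ring)
        (by
          have hcnt : (pre ++ ['O']).count 'O' = pre.count 'O' + 1 := by simp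
          rw [hcnt]
          push_cast
          rw [cwLoad_succ]
          simp only [List.sum_append, List.sum_cons, List.sum_nil]
          linarith [hw])
      have hc : ((pre ++ ['O']).count 'O' : Int) = (pre.count 'O' : Int) + 1 := by
        simp [List.count_append]
      rw [hc] at h2
      simpa [add_assoc] using h2
    · by_cases hH : c = '#'
      · subst hH
        have hstep : cwA_step L (w, segstart + (pre.count 'O' : Int)) (i + 1, '#')
            = (w, i + 1) := by
          simp [cwA_step]
        rw [hstep]
        have hB : cwSplit pre ('#' :: rest) = pre :: cwSplit [] rest := by
          simp [cwSplit]
        rw [hB]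
        simp only [List.foldl_cons]
        have hseg : cwB_seg L (total, segstart) pre
            = (total + cwLoad (pre.count 'O' : Int) L segstart, segstart + (pre.length : Int) + 1) := by
          simp [cwB_seg, count_single]
        rw [hseg]
        have h2 := ih [] (i + 1) w base (total + cwLoad (pre.count 'O' : Int) L segstart) (i + 1)
          (by simp)
          (by simp [cwLoad_zero]; linarith [hw])
        simp only [List.count_nil, Nat.cast_zero, add_zero] at h2
        rw [h2, hi]
      · have hstep : cwA_step L (w, segstart + (pre.count 'O' : Int)) (i + 1, c)
            = (w, segstart + (pre.count 'O' : Int)) := by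
          simp [cwA_step, hO, hH]
        rw [hstep]
        have hB : cwSplit pre (c :: rest) = cwSplit (pre ++ [c]) rest := by
          simp [cwSplit, hH]
        rw [hB]
        have h2 := ih (pre ++ [c]) (i + 1) w base total segstart
          (by simp [hi]; ring)
          (by
            simp only [List.count_append]
            have : [c].count 'O' = 0 := by simp [hO]
            rw [this]
            simpa using hw)
        have hc : ((pre ++ [c]).count 'O' : Int) = (pre.count 'O' : Int) := by
          simp [List.count_append, List.count_singleton]
          simp [hO]
        rw [hc] at h2
        simpa using h2

-- ===== VERDICT (by name: the statement is the Claim_ definition above) =====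
theorem count_weight_on_pole_spec : Claim_equal_count_weight_on_pole := by
  intro platform _
  unfold Spec_count_weight_on_pole count_weight_on_pole count_weight_on_pole_alt
  congr 1
  funext answer line
  rw [splitOn_eq]
  have h := cw_core (PySem.Str.len line) line.toList [] 0 [] answer answer 0
    (by simp) (by simp [cwLoad_zero])
  simpa using h
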